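-- pv_equiv track=rewrite | github.com/npc0vo/DataStructures | Python/查找/顺序查找.py | seSearch
-- ===== SOURCE A (Python) =====
-- def seSearch(list,item):
--     pos=0
--     found=False
--     flag=0
--     stop=False
--
--     while pos <= len(list)-1 and not stop:
--         if list[pos]==item:
--             found=True
--             flag=pos
--         else:
--             if list[pos]>item:
--                 stop=True
--         pos+=1
--
--     return found,flag
-- ===== SOURCE B (Python) =====
-- def seSearch(list, item):
--     # locate cutoff: index of first element strictly greater than item
--     cut = len(list)
--     for i, x in enumerate(list):
--         if x > item:
--             cut = i
--             break
--     prefix = list[:cut]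
--     # scan prefix backward for the last occurrence of item
--     for j in range(len(prefix) - 1, -1, -1):
--         if prefix[j] == item:
--             return True, j
--     return False, 0
-- ===== Notes on version B (the rewrite author's own statement) =====
-- stated objective: alternative
-- what changed: Replaces the single interleaved record-and-stop loop with a two-phase structure: first locate the cutoff (first element greater than item), then scan the prefix backwards for the last occurrence, returning immediately.
import Mathlib
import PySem

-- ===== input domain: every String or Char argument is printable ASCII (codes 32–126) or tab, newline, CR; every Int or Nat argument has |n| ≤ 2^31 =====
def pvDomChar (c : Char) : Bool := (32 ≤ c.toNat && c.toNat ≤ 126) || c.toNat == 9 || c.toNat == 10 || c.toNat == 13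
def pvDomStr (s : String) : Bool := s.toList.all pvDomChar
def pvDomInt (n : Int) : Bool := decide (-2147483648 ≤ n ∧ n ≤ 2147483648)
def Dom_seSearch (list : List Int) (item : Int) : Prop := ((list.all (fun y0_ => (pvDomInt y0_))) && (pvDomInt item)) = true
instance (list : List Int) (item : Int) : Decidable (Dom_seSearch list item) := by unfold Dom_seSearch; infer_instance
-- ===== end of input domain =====

-- ===== PORT A =====
-- B changes the decomposition: A is one interleaved record-and-stop scan; B locates the cutoff, then scans the prefix backwards.
-- literal transliteration of A's while-loop: pos/found/flag carried as state, stop = returning early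
def seSearchLoop (l : List Int) (item : Int) (pos : Int) (found : Bool) (flag : Int) : Bool × Int :=
  match l with
  | [] => (found, flag)
  | x :: rest =>
    if x = item then seSearchLoop rest item (pos + 1) true pos
    else if x > item then (found, flag)
    else seSearchLoop rest item (pos + 1) found flag

def seSearch (list : List Int) (item : Int) : Bool × Int :=
  seSearchLoop list item 0 false 0

-- ===== PORT B =====
-- first loop of B: index of the first element strictly greater than item (or length)
def cutLen (l : List Int) (item : Int) : Nat :=
  match l with
  | [] => 0
  | x :: rest => if x > item then 0 else 1 + cutLen rest item

-- second loop of B: backward scan of p at indices n-1, n-2, ..., 0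
def backScan (p : List Int) (item : Int) : Nat → Bool × Int
  | 0 => (false, 0)
  | Nat.succ j => if p.getD j 0 = item then (true, (j : Int)) else backScan p item j

def seSearch_alt (list : List Int) (item : Int) : Bool × Int :=
  let pfx := list.take (cutLen list item)
  backScan pfx item pfx.length

-- ===== PRECONDITION & SPEC =====
def Spec_seSearch (list : List Int) (item : Int) (out : Bool × Int) : Prop := out = seSearch_alt list item
instance (list : List Int) (item : Int) (out : Bool × Int) : Decidable (Spec_seSearch list item out) := by unfold Spec_seSearch; infer_instance

-- ===== CLAIM (what is proved, stated in full; the proofs are below) =====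
def Claim_equal_seSearch : Prop := ∀ (list : List Int) (item : Int), Dom_seSearch list item → Spec_seSearch list item (seSearch list item)

-- ===== LEMMAS AND PROOFS =====

theorem backScan_cons (x : Int) (p : List Int) (item : Int) (n : Nat) :
    backScan (x :: p) item (n + 1) =
      match backScan p item n with
      | (true, j) => (true, j + 1)
      | (false, _) => if x = item then (true, 0) else (false, 0) := by
  induction n with
  | zero => simp [backScan]
  | succ n ih =>
    show (if (x :: p).getD (n+1) 0 = item then ((true : Bool), ((n:Int) + 1)) else backScan (x :: p) item (n+1)) = _
    rw [List.getD_cons_succ, ih]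
    by_cases h : p.getD n 0 = item
    · rw [List.getD] at h; simp [backScan, List.getD, h]
    · rw [List.getD] at h; simp [backScan, List.getD, h]

theorem seSearchLoop_eq (l : List Int) (item : Int) :
    ∀ (pos : Int) (found : Bool) (flag : Int),
    seSearchLoop l item pos found flag =
      match backScan (l.take (cutLen l item)) item (l.take (cutLen l item)).length with
      | (true, j) => (true, pos + j)
      | (false, _) => (found, flag) := by
  induction l with
  | nil => intro pos found flag; simp [seSearchLoop, cutLen, backScan]
  | cons x rest ih =>
    intro pos found flag
    by_cases hgt : x > item
    · have hne : ¬ x = item := by omega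
      simp [seSearchLoop, cutLen, hgt, hne, backScan]
    · have htake : (x :: rest).take (cutLen (x :: rest) item)
          = x :: rest.take (cutLen rest item) := by
        simp [cutLen, hgt, Nat.add_comm 1, List.take_succ_cons]
      rw [htake]
      have hlen : (x :: rest.take (cutLen rest item)).length
          = (rest.take (cutLen rest item)).length + 1 := by simp
      rw [hlen, backScan_cons]
      by_cases heq : x = item
      · simp only [seSearchLoop, if_pos heq]
        rw [ih (pos + 1) true pos]
        rcases hbs : backScan (rest.take (cutLen rest item)) item
            (rest.take (cutLen rest item)).length with ⟨b, j⟩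
        cases b <;> simp [heq] <;> omega
      · simp only [seSearchLoop, if_neg heq, if_neg hgt]
        rw [ih (pos + 1) found flag]
        rcases hbs : backScan (rest.take (cutLen rest item)) item
            (rest.take (cutLen rest item)).length with ⟨b, j⟩
        cases b <;> simp [heq] <;> omega

theorem backScan_false (p : List Int) (item : Int) :
    ∀ (n : Nat) (j : Int), backScan p item n = (false, j) → j = 0 := by
  intro n
  induction n with
  | zero => intro j h; simp [backScan] at h; omega
  | succ n ih =>
    intro j h
    by_cases hx : p.getD n 0 = item
    · rw [List.getD] at hx; simp [backScan, List.getD, hx] at h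
    · rw [List.getD] at hx; simp [backScan, List.getD, hx] at h; exact ih j h

-- ===== VERDICT (by name: the statement is the Claim_ definition above) =====
theorem seSearch_spec : Claim_equal_seSearch := by
  intro l item _
  unfold Spec_seSearch seSearch seSearch_alt
  rw [seSearchLoop_eq l item 0 false 0]
  rcases hbs : backScan (l.take (cutLen l item)) item (l.take (cutLen l item)).length with ⟨b, j⟩
  cases b
  · have := backScan_false _ _ _ _ hbs; simp [this]
  · simp
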